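-- pv_equiv track=rewrite | github.com/gniziemazity/LEO-js | scripts/utils/similarity_measures.py | comment_flag_indices
-- ===== SOURCE A (Python) =====
-- from typing import Dict, List, Set, Tuple
--
-- def comment_flag_indices(
--     sorted_ts: List[int],
--     n_comment: int,
--     comment_only_ts: Set[int],
--     window_ms: int = 60_000,
-- ) -> Set[int]:
--     if n_comment <= 0:
--         return set()
--     if not comment_only_ts:
--         return set(range(min(n_comment, len(sorted_ts))))
--     scores = [
--         (
--             sum(1 for ct in comment_only_ts if abs(t - ct) <= window_ms),
--             min(abs(t - ct) for ct in comment_only_ts),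
--             i,
--         )
--         for i, t in enumerate(sorted_ts)
--     ]
--     scores.sort(key=lambda x: (-x[0], x[1], x[2]))
--     return {i for *_, i in scores[:n_comment]}
-- ===== SOURCE B (Python) =====
-- from typing import List, Set
--
--
-- def _bisect_left(a: List[int], x: int) -> int:
--     lo, hi = 0, len(a)
--     while lo < hi:
--         mid = (lo + hi) // 2
--         if a[mid] < x:
--             lo = mid + 1
--         else:
--             hi = mid
--     return lo
--
--
-- def _bisect_right(a: List[int], x: int) -> int:
--     lo, hi = 0, len(a)
--     while lo < hi:
--         mid = (lo + hi) // 2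
--         if a[mid] <= x:
--             lo = mid + 1
--         else:
--             hi = mid
--     return lo
--
--
-- def comment_flag_indices(
--     sorted_ts: List[int],
--     n_comment: int,
--     comment_only_ts: Set[int],
--     window_ms: int = 60_000,
-- ) -> Set[int]:
--     if n_comment <= 0:
--         return set()
--     if not comment_only_ts:
--         return set(range(min(n_comment, len(sorted_ts))))
--     cs = sorted(comment_only_ts)
--
--     def score(t: int):
--         # window count via two binary searches (slice clamps an inverted range to 0)
--         cnt = len(cs[_bisect_left(cs, t - window_ms):_bisect_right(cs, t + window_ms)])
--         # nearest distance: only the neighbours of the insertion point matter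
--         j = _bisect_left(cs, t)
--         if j == 0:
--             dist = cs[j] - t
--         elif j == len(cs):
--             dist = t - cs[j - 1]
--         else:
--             dist = min(t - cs[j - 1], cs[j] - t)
--         return cnt, dist
--
--     scores = [(*score(t), i) for i, t in enumerate(sorted_ts)]
--     scores.sort(key=lambda x: (-x[0], x[1], x[2]))
--     return {i for *_, i in scores[:n_comment]}
-- ===== Notes on version B (the rewrite author's own statement) =====
-- stated objective: faster
-- what changed: B sorts the comment timestamps once and computes each index's window count and nearest distance with O(log M) binary searches (count = length of the slice between two bisections, nearest = the better of the two neighbours of the insertion point), replacing A's O(M) scan of the whole comment set per timestamp.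
import Mathlib
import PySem

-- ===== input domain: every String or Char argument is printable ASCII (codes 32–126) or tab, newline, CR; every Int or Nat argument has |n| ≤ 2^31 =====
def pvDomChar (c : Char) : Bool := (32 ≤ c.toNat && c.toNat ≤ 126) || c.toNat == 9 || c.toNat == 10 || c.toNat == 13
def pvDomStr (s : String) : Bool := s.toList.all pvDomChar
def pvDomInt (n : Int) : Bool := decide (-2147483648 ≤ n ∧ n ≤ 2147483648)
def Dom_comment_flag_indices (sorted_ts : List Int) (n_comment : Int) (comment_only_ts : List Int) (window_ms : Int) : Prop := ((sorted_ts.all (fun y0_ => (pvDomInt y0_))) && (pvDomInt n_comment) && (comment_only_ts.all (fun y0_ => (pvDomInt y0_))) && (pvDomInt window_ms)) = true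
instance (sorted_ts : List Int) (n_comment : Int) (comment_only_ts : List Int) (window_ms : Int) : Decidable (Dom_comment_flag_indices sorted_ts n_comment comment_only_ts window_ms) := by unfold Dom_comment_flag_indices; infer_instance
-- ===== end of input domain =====

-- B replaces A's O(M) scan of the comment set per timestamp by binary searches on the
-- sorted comment timestamps (asymptotically faster); the returned set is unchanged.

-- ===== PORT A =====
-- literal port of A: per index, a full scan of comment_only_ts for the window count and
-- the minimal |t - ct|; then a stable sort by (-count, dist, i) and the first n_comment indices.
def comment_flag_indices (sorted_ts : List Int) (n_comment : Int) (comment_only_ts : List Int) (window_ms : Int) : List Int :=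
  if n_comment ≤ 0 then []
  else if comment_only_ts = [] then
    PySem.Set.ofList (PySem.List.pyRange 0 (min n_comment (sorted_ts.length : Int)) 1)
  else
    let scores : List (Int × Int × Int) :=
      (PySem.List.enumerate sorted_ts).map (fun p =>
        (comment_only_ts.foldl (fun acc ct => if |p.2 - ct| ≤ window_ms then acc + 1 else acc) (0 : Int),
         (PySem.List.min? (comment_only_ts.map (fun ct => |p.2 - ct|)) (fun y => y)).getD 0,
         p.1))
    -- Python's tuple key (-c, d, i) compares lexicographically: key into Lex pairs
    let sortedScores := PySem.List.sorted scores (fun x => toLex ((-x.1 : Int), toLex (x.2.1, x.2.2))) false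
    PySem.Set.ofList ((PySem.List.slice sortedScores none (some n_comment)).map (fun x => x.2.2))

-- ===== PORT B =====
-- Source B's hand-written _bisect_left/_bisect_right are the standard binary-search loops,
-- ported as PySem.List.bisectLeft / bisectRight (the same loop).
def comment_flag_indices_alt (sorted_ts : List Int) (n_comment : Int) (comment_only_ts : List Int) (window_ms : Int) : List Int :=
  if n_comment ≤ 0 then []
  else if comment_only_ts = [] then
    PySem.Set.ofList (PySem.List.pyRange 0 (min n_comment (sorted_ts.length : Int)) 1)
  else
    let cs := PySem.List.sorted comment_only_ts (fun x => x) false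
    let score : Int → Int × Int := fun t =>
      let cnt : Int :=
        ((PySem.List.slice cs (some ((PySem.List.bisectLeft cs (t - window_ms) : Nat) : Int))
                              (some ((PySem.List.bisectRight cs (t + window_ms) : Nat) : Int))).length : Int)
      let j := PySem.List.bisectLeft cs t
      let dist : Int :=
        if j = 0 then PySem.List.pyGetD cs (j : Int) 0 - t
        else if j = cs.length then t - PySem.List.pyGetD cs ((j : Int) - 1) 0
        else min (t - PySem.List.pyGetD cs ((j : Int) - 1) 0) (PySem.List.pyGetD cs (j : Int) 0 - t)
      (cnt, dist)
    let scores : List (Int × Int × Int) :=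
      (PySem.List.enumerate sorted_ts).map (fun p => ((score p.2).1, (score p.2).2, p.1))
    let sortedScores := PySem.List.sorted scores (fun x => toLex ((-x.1 : Int), toLex (x.2.1, x.2.2))) false
    PySem.Set.ofList ((PySem.List.slice sortedScores none (some n_comment)).map (fun x => x.2.2))

-- ===== PRECONDITION & SPEC =====
def Spec_comment_flag_indices (sorted_ts : List Int) (n_comment : Int) (comment_only_ts : List Int) (window_ms : Int) (out : List Int) : Prop := out = comment_flag_indices_alt sorted_ts n_comment comment_only_ts window_ms
instance (sorted_ts : List Int) (n_comment : Int) (comment_only_ts : List Int) (window_ms : Int) (out : List Int) : Decidable (Spec_comment_flag_indices sorted_ts n_comment comment_only_ts window_ms out) := by unfold Spec_comment_flag_indices; infer_instance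

-- ===== CLAIM (what is proved, stated in full; the proofs are below) =====
def Claim_equal_comment_flag_indices : Prop := ∀ (sorted_ts : List Int) (n_comment : Int) (comment_only_ts : List Int) (window_ms : Int), Dom_comment_flag_indices sorted_ts n_comment comment_only_ts window_ms → Spec_comment_flag_indices sorted_ts n_comment comment_only_ts window_ms (comment_flag_indices sorted_ts n_comment comment_only_ts window_ms)

-- ===== LEMMAS AND PROOFS =====

-- countP of a list that is "all p" strictly below position k and "none p" from k on is k
theorem pv_countP_eq_of_split (cs : List Int) (p : Int → Bool) (k : Nat) (hk : k ≤ cs.length)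
    (h1 : ∀ i (h : i < cs.length), i < k → p cs[i])
    (h2 : ∀ i (h : i < cs.length), k ≤ i → ¬ p cs[i]) :
    cs.countP p = k := by
  induction cs generalizing k with
  | nil => simp at hk ⊢; omega
  | cons c tl ih =>
    cases k with
    | zero =>
      rw [List.countP_eq_zero]
      intro a ha
      rw [List.mem_iff_getElem] at ha
      obtain ⟨i, hi, rfl⟩ := ha
      exact h2 i hi (Nat.zero_le _)
    | succ k' =>
      have hc : p c := h1 0 (by simp) (by omega)
      rw [List.countP_cons]
      have := ih k' (by simpa using hk)
        (fun i h hik => h1 (i+1) (by simpa using h) (by omega))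
        (fun i h hik => h2 (i+1) (by simpa using h) (by omega))
      simp [hc, this]

theorem pv_bisectLeft_eq (cs : List Int) (x : Int) (hs : List.Pairwise (· ≤ ·) cs) :
    PySem.List.bisectLeft cs x = cs.countP (fun c => decide (c < x)) := by
  obtain ⟨hle, hlt, hge⟩ := PySem.List.bisectLeft_spec cs x hs
  exact (pv_countP_eq_of_split cs _ _ hle
    (fun i h hik => by simpa using hlt i h hik)
    (fun i h hik => by simpa using not_lt.mpr (hge i h hik))).symm

theorem pv_bisectRight_eq (cs : List Int) (x : Int) (hs : List.Pairwise (· ≤ ·) cs) :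
    PySem.List.bisectRight cs x = cs.countP (fun c => decide (c ≤ x)) := by
  obtain ⟨hle, hlt, hge⟩ := PySem.List.bisectRight_spec cs x hs
  exact (pv_countP_eq_of_split cs _ _ hle
    (fun i h hik => by simpa using hlt i h hik)
    (fun i h hik => by simpa using not_le.mpr (hge i h hik))).symm

-- splitting the count "≤ t+w" into "< t-w" and the window, for a nonneg window
theorem pv_countP_split (t w : Int) (hw : 0 ≤ w) (cs : List Int) :
    cs.countP (fun c => decide (c ≤ t + w)) =
      cs.countP (fun c => decide (c < t - w)) + cs.countP (fun c => decide (t - w ≤ c ∧ c ≤ t + w)) := by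
  induction cs with
  | nil => simp
  | cons c tl ih =>
    simp only [List.countP_cons, ih, decide_eq_true_eq]
    split_ifs <;> omega

-- A's scan count of the window equals B's slice length between the two bisections
theorem pv_cnt_full (cts cs : List Int) (hs : List.Pairwise (· ≤ ·) cs) (hperm : cs.Perm cts)
    (t w : Int) :
    cts.foldl (fun acc ct => if |t - ct| ≤ w then acc + 1 else acc) (0 : Int) =
      ((PySem.List.slice cs (some ((PySem.List.bisectLeft cs (t - w) : Nat) : Int))
          (some ((PySem.List.bisectRight cs (t + w) : Nat) : Int))).length : Int) := by
  rw [PySem.List.foldl_ite_add_one, PySem.List.length_slice, PySem.List.clampIdx_natCast,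
    PySem.List.clampIdx_natCast, pv_bisectLeft_eq cs _ hs, pv_bisectRight_eq cs _ hs]
  have hcnt : cts.countP (fun ct => decide (|t - ct| ≤ w)) =
      cs.countP (fun c => decide (t - w ≤ c ∧ c ≤ t + w)) := by
    rw [hperm.countP_eq]
    apply List.countP_congr
    intro c _
    simp only [decide_eq_true_eq, abs_le]
    constructor <;> intro h <;> omega
  have hL : cs.countP (fun c => decide (c < t - w)) ≤ cs.length := List.countP_le_length
  have hH : cs.countP (fun c => decide (c ≤ t + w)) ≤ cs.length := List.countP_le_length
  rw [hcnt, Nat.min_eq_left hH, Nat.min_eq_left hL]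
  by_cases hw : 0 ≤ w
  · have := pv_countP_split t w hw cs
    omega
  · have h0 : cs.countP (fun c => decide (t - w ≤ c ∧ c ≤ t + w)) = 0 := by
      rw [List.countP_eq_zero]
      intro a _
      simp only [decide_eq_true_eq, not_and, not_le]
      omega
    have hmono : cs.countP (fun c => decide (c ≤ t + w)) ≤ cs.countP (fun c => decide (c < t - w)) :=
      List.countP_mono_left (fun a _ h => by simp at h ⊢; omega)
    omega

-- the neighbour-of-insertion-point distance is the minimum of |t - c| over a sorted nonempty cs:
-- it is attained at some element and is a lower bound
theorem pv_dist_min (cs : List Int) (hs : List.Pairwise (· ≤ ·) cs) (hne : cs ≠ []) (t : Int) :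
    (∃ c ∈ cs,
      (if PySem.List.bisectLeft cs t = 0 then
         PySem.List.pyGetD cs ((PySem.List.bisectLeft cs t : Nat) : Int) 0 - t
       else if PySem.List.bisectLeft cs t = cs.length then
         t - PySem.List.pyGetD cs (((PySem.List.bisectLeft cs t : Nat) : Int) - 1) 0
       else min (t - PySem.List.pyGetD cs (((PySem.List.bisectLeft cs t : Nat) : Int) - 1) 0)
                (PySem.List.pyGetD cs ((PySem.List.bisectLeft cs t : Nat) : Int) 0 - t)) = |t - c|) ∧
    (∀ c ∈ cs,
      (if PySem.List.bisectLeft cs t = 0 then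
         PySem.List.pyGetD cs ((PySem.List.bisectLeft cs t : Nat) : Int) 0 - t
       else if PySem.List.bisectLeft cs t = cs.length then
         t - PySem.List.pyGetD cs (((PySem.List.bisectLeft cs t : Nat) : Int) - 1) 0
       else min (t - PySem.List.pyGetD cs (((PySem.List.bisectLeft cs t : Nat) : Int) - 1) 0)
                (PySem.List.pyGetD cs ((PySem.List.bisectLeft cs t : Nat) : Int) 0 - t)) ≤ |t - c|) := by
  obtain ⟨hle, hlt, hge⟩ := PySem.List.bisectLeft_spec cs t hs
  have hp := List.pairwise_iff_getElem.mp hs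
  have hlen : 0 < cs.length := List.length_pos_of_ne_nil hne
  have hget : ∀ (n : Nat) (h : n < cs.length), PySem.List.pyGetD cs ((n : Nat) : Int) 0 = cs[n] := by
    intro n h
    rw [PySem.List.pyGetD_natCast, List.getD_eq_getElem cs 0 h]
  by_cases h0 : PySem.List.bisectLeft cs t = 0
  · -- every element is ≥ t; the minimum is the first element
    have hall : ∀ (i : Nat) (h : i < cs.length), t ≤ cs[i] := fun i h => hge i h (by omega)
    rw [if_pos h0, h0, hget 0 hlen]
    refine ⟨⟨cs[0], List.getElem_mem hlen, ?_⟩, ?_⟩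
    · have := hall 0 hlen
      rw [abs_of_nonpos (by omega)]; ring
    · intro c hc
      obtain ⟨i, hi, rfl⟩ := List.mem_iff_getElem.mp hc
      have h1 := hall i hi
      have h2 : cs[0] ≤ cs[i] := by
        rcases Nat.eq_zero_or_pos i with h | h
        · subst h; rfl
        · exact hp 0 i hlen hi h
      rcases abs_cases (t - cs[i]) with ⟨he, _⟩ | ⟨he, _⟩ <;> omega
  by_cases hend : PySem.List.bisectLeft cs t = cs.length
  · -- every element is < t; the minimum is the last element
    have hall : ∀ (i : Nat) (h : i < cs.length), cs[i] < t := fun i h => hlt i h (by omega)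
    have hlast : cs.length - 1 < cs.length := by omega
    rw [if_neg h0, if_pos hend]
    rw [show (((PySem.List.bisectLeft cs t : Nat) : Int) - 1 = ((cs.length - 1 : Nat) : Int)) from
      (by rw [hend]; omega), hget (cs.length - 1) hlast]
    refine ⟨⟨cs[cs.length - 1], List.getElem_mem hlast, ?_⟩, ?_⟩
    · have := hall (cs.length - 1) hlast
      rw [abs_of_nonneg (by omega)]
    · intro c hc
      obtain ⟨i, hi, rfl⟩ := List.mem_iff_getElem.mp hc
      have h1 := hall i hi
      have h2 : cs[i] ≤ cs[cs.length - 1] := by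
        rcases Nat.lt_or_ge i (cs.length - 1) with h | h
        · exact hp i (cs.length - 1) hi hlast h
        · have : i = cs.length - 1 := by omega
          subst this; rfl
      rcases abs_cases (t - cs[i]) with ⟨he, _⟩ | ⟨he, _⟩ <;> omega
  · -- interior insertion point: the two neighbours
    have hj : 0 < PySem.List.bisectLeft cs t ∧ PySem.List.bisectLeft cs t < cs.length := by
      have := hle; omega
    obtain ⟨hj0, hjlen⟩ := hj
    have hjm : PySem.List.bisectLeft cs t - 1 < cs.length := by omega
    have hlo : cs[PySem.List.bisectLeft cs t - 1] < t := hlt _ hjm (by omega)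
    have hhi : t ≤ cs[PySem.List.bisectLeft cs t] := hge _ hjlen (by omega)
    rw [if_neg h0, if_neg hend]
    rw [show (((PySem.List.bisectLeft cs t : Nat) : Int) - 1
        = ((PySem.List.bisectLeft cs t - 1 : Nat) : Int)) from (by omega),
      hget (PySem.List.bisectLeft cs t - 1) hjm, hget (PySem.List.bisectLeft cs t) hjlen]
    have hml : min (t - cs[PySem.List.bisectLeft cs t - 1]) (cs[PySem.List.bisectLeft cs t] - t)
        ≤ t - cs[PySem.List.bisectLeft cs t - 1] := min_le_left _ _
    have hmr : min (t - cs[PySem.List.bisectLeft cs t - 1]) (cs[PySem.List.bisectLeft cs t] - t)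
        ≤ cs[PySem.List.bisectLeft cs t] - t := min_le_right _ _
    refine ⟨?_, ?_⟩
    · rcases le_total (t - cs[PySem.List.bisectLeft cs t - 1]) (cs[PySem.List.bisectLeft cs t] - t)
        with h | h
      · refine ⟨cs[PySem.List.bisectLeft cs t - 1], List.getElem_mem hjm, ?_⟩
        rw [min_eq_left h, abs_of_nonneg (by omega)]
      · refine ⟨cs[PySem.List.bisectLeft cs t], List.getElem_mem hjlen, ?_⟩
        rw [min_eq_right h, abs_of_nonpos (by omega)]; ring
    · intro c hc
      obtain ⟨i, hi, rfl⟩ := List.mem_iff_getElem.mp hc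
      rcases Nat.lt_or_ge i (PySem.List.bisectLeft cs t) with h | h
      · have h2 : cs[i] ≤ cs[PySem.List.bisectLeft cs t - 1] := by
          rcases Nat.lt_or_ge i (PySem.List.bisectLeft cs t - 1) with h' | h'
          · exact hp i _ hi hjm h'
          · have : i = PySem.List.bisectLeft cs t - 1 := by omega
            subst this; rfl
        have h3 := hlt i hi h
        rcases abs_cases (t - cs[i]) with ⟨he, _⟩ | ⟨he, _⟩ <;> omega
      · have h2 : cs[PySem.List.bisectLeft cs t] ≤ cs[i] := by
          rcases Nat.lt_or_ge (PySem.List.bisectLeft cs t) i with h' | h'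
          · exact hp _ i hjlen hi h'
          · have : i = PySem.List.bisectLeft cs t := by omega
            subst this; rfl
        have h3 := hge i hi h
        rcases abs_cases (t - cs[i]) with ⟨he, _⟩ | ⟨he, _⟩ <;> omega

-- A's min-of-all-distances equals B's neighbour distance
theorem pv_dist_full (cts cs : List Int) (hs : List.Pairwise (· ≤ ·) cs) (hperm : cs.Perm cts)
    (hne : cts ≠ []) (t : Int) :
    (PySem.List.min? (cts.map (fun ct => |t - ct|)) (fun y => y)).getD 0 =
      (if PySem.List.bisectLeft cs t = 0 then
         PySem.List.pyGetD cs ((PySem.List.bisectLeft cs t : Nat) : Int) 0 - t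
       else if PySem.List.bisectLeft cs t = cs.length then
         t - PySem.List.pyGetD cs (((PySem.List.bisectLeft cs t : Nat) : Int) - 1) 0
       else min (t - PySem.List.pyGetD cs (((PySem.List.bisectLeft cs t : Nat) : Int) - 1) 0)
                (PySem.List.pyGetD cs ((PySem.List.bisectLeft cs t : Nat) : Int) 0 - t)) := by
  have hcsne : cs ≠ [] := by
    intro h
    exact hne ((h ▸ hperm : ([] : List Int).Perm cts).symm.eq_nil)
  obtain ⟨⟨c1, hc1, heq1⟩, hmin⟩ := pv_dist_min cs hs hcsne t
  cases hm : PySem.List.min? (cts.map (fun ct => |t - ct|)) (fun y => y) with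
  | none =>
    rw [PySem.List.min?_eq_none_iff] at hm
    simp only [List.map_eq_nil_iff] at hm
    exact absurd hm hne
  | some m =>
    obtain ⟨c0, hc0, hme⟩ := List.mem_map.mp (PySem.List.min?_mem hm)
    have h1 : m ≤ _ := heq1 ▸ PySem.List.min?_isMin hm (|t - c1|)
      (List.mem_map.mpr ⟨c1, hperm.subset hc1, rfl⟩)
    have h2 := hme ▸ hmin c0 (hperm.symm.subset hc0)
    simp only [Option.getD_some]
    omega

-- ===== VERDICT (by name: the statement is the Claim_ definition above) =====
theorem comment_flag_indices_spec : Claim_equal_comment_flag_indices := by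
  intro sorted_ts n_comment comment_only_ts window_ms _
  unfold Spec_comment_flag_indices comment_flag_indices comment_flag_indices_alt
  by_cases h1 : n_comment ≤ 0
  · simp [h1]
  by_cases h2 : comment_only_ts = []
  · simp [h1, h2]
  simp only [h1, h2, if_false]
  have hs : List.Pairwise (· ≤ ·) (PySem.List.sorted comment_only_ts (fun x => x) false) :=
    PySem.List.sorted_pairwise comment_only_ts (fun x => x)
  have hperm : (PySem.List.sorted comment_only_ts (fun x => x) false).Perm comment_only_ts :=
    PySem.List.sorted_perm comment_only_ts (fun x => x) false
  have hscores :
      (PySem.List.enumerate sorted_ts).map (fun p : Int × Int =>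
        ((comment_only_ts.foldl (fun acc ct => if |p.2 - ct| ≤ window_ms then acc + 1 else acc) (0 : Int),
          (PySem.List.min? (comment_only_ts.map (fun ct => |p.2 - ct|)) (fun y => y)).getD 0,
          p.1) : Int × Int × Int)) =
      (PySem.List.enumerate sorted_ts).map (fun p : Int × Int =>
        ((((PySem.List.slice (PySem.List.sorted comment_only_ts (fun x => x) false)
              (some ((PySem.List.bisectLeft (PySem.List.sorted comment_only_ts (fun x => x) false) (p.2 - window_ms) : Nat) : Int))
              (some ((PySem.List.bisectRight (PySem.List.sorted comment_only_ts (fun x => x) false) (p.2 + window_ms) : Nat) : Int))).length : Int),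
          (if PySem.List.bisectLeft (PySem.List.sorted comment_only_ts (fun x => x) false) p.2 = 0 then
             PySem.List.pyGetD (PySem.List.sorted comment_only_ts (fun x => x) false)
               ((PySem.List.bisectLeft (PySem.List.sorted comment_only_ts (fun x => x) false) p.2 : Nat) : Int) 0 - p.2
           else if PySem.List.bisectLeft (PySem.List.sorted comment_only_ts (fun x => x) false) p.2
               = (PySem.List.sorted comment_only_ts (fun x => x) false).length then
             p.2 - PySem.List.pyGetD (PySem.List.sorted comment_only_ts (fun x => x) false)
               (((PySem.List.bisectLeft (PySem.List.sorted comment_only_ts (fun x => x) false) p.2 : Nat) : Int) - 1) 0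
           else min (p.2 - PySem.List.pyGetD (PySem.List.sorted comment_only_ts (fun x => x) false)
                 (((PySem.List.bisectLeft (PySem.List.sorted comment_only_ts (fun x => x) false) p.2 : Nat) : Int) - 1) 0)
               (PySem.List.pyGetD (PySem.List.sorted comment_only_ts (fun x => x) false)
                 ((PySem.List.bisectLeft (PySem.List.sorted comment_only_ts (fun x => x) false) p.2 : Nat) : Int) 0 - p.2)),
          p.1) : Int × Int × Int)) := by
    apply List.map_congr_left
    intro p _
    have hc := pv_cnt_full comment_only_ts _ hs hperm p.2 window_ms
    have hd := pv_dist_full comment_only_ts _ hs hperm h2 p.2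
    rw [Prod.ext_iff, Prod.ext_iff]
    exact ⟨hc, hd, rfl⟩
  exact congrArg (fun l : List (Int × Int × Int) =>
    PySem.Set.ofList ((PySem.List.slice
      (PySem.List.sorted l (fun x => toLex ((-x.1 : Int), toLex (x.2.1, x.2.2))) false)
      none (some n_comment)).map (fun x => x.2.2))) hscores
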